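-- pv_equiv track=rewrite | github.com/thienchi2109/langextract-software | core/utils.py | sanitize_filename
-- ===== SOURCE A (Python) =====
-- def sanitize_filename(filename: str) -> str:
--     """
--     Sanitize filename for safe file system operations.
--
--     Args:
--         filename: Original filename
--
--     Returns:
--         Sanitized filename
--     """
--     # Remove or replace invalid characters
--     invalid_chars = '<>:"/\\|?*'
--     for char in invalid_chars:
--         filename = filename.replace(char, '_')
--
--     # Remove leading/trailing spaces and dots
--     filename = filename.strip(' .')
--
--     # Ensure filename is not empty
--     if not filename:
--         filename = 'untitled'
--
--     # Limit length
--     if len(filename) > 200: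
--         filename = filename[:200]
--
--     return filename
-- ===== SOURCE B (Python) =====
-- def sanitize_filename(filename: str) -> str:
--     """Sanitize filename: one char-mapping pass, pop-loop strip, truncate in the final join."""
--     bad = set('<>:"/\\|?*')
--     chars = ['_' if c in bad else c for c in filename]
--     while chars and chars[0] in (' ', '.'):
--         chars.pop(0)
--     while chars and chars[-1] in (' ', '.'):
--         chars.pop()
--     if not chars:
--         return 'untitled'
--     return ''.join(chars[:200])
-- ===== Notes on version B (the rewrite author's own statement) =====
-- stated objective: alternative
-- what changed: Instead of nine sequential full-string replace passes followed by strip and a conditional truncation, B does one character-mapping pass over a char list, strips edges with explicit pop loops, and folds the 200-char truncation into the final join; the empty case returns early.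
import Mathlib
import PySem

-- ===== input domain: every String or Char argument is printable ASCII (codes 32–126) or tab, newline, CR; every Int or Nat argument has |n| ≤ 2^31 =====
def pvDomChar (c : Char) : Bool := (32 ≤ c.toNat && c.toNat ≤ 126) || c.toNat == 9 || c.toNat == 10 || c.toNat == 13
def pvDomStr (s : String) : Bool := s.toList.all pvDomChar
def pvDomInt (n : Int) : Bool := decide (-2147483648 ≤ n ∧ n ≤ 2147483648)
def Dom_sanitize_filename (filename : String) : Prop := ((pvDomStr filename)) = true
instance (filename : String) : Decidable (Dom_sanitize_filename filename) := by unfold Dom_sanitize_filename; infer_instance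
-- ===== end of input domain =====

-- B (alternative): instead of nine sequential full-string replace passes, strip and a
-- conditional truncation, B maps each character once over a char list, strips the edges
-- with explicit pop loops, and folds the 200-char truncation into the final join.

-- ===== PORT A =====
-- for char in '<>:"/\|?*': filename = filename.replace(char, '_')
def sanitize_filename (filename : String) : String :=
  let fn := ("<>:\"/\\|?*".toList).foldl
    (fun s c => PySem.Str.replace s (String.ofList [c]) "_") filename
  let fn := PySem.Str.stripChars fn " ."
  let fn := if fn = "" then "untitled" else fn
  if PySem.Str.len fn > 200 then PySem.Str.slice fn none (some 200) else fn

-- ===== PORT B =====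
-- bad = set('<>:"/\|?*'); chars = ['_' if c in bad else c for c in filename]
def pvBad (c : Char) : Bool := c ∈ ['<','>',':','"','/','\\','|','?','*']
-- chars[0] in (' ', '.')  /  chars[-1] in (' ', '.')
def pvStripCh (c : Char) : Bool := c = ' ' || c = '.'

def sanitize_filename_alt (filename : String) : String :=
  let chars := filename.toList.map (fun c => if pvBad c then '_' else c)
  -- while chars and chars[0] in (' ', '.'): chars.pop(0)
  let chars := chars.dropWhile pvStripCh
  -- while chars and chars[-1] in (' ', '.'): chars.pop()
  let chars := (chars.reverse.dropWhile pvStripCh).reverse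
  if chars = [] then "untitled" else String.ofList (chars.take 200)

-- ===== PRECONDITION & SPEC =====
def Spec_sanitize_filename (filename : String) (out : String) : Prop := out = sanitize_filename_alt filename
instance (filename : String) (out : String) : Decidable (Spec_sanitize_filename filename out) := by unfold Spec_sanitize_filename; infer_instance

-- ===== CLAIM (what is proved, stated in full; the proofs are below) =====
def Claim_equal_sanitize_filename : Prop := ∀ (filename : String), Dom_sanitize_filename filename → Spec_sanitize_filename filename (sanitize_filename filename)

-- ===== LEMMAS AND PROOFS =====

-- replacing a single character by a single character is a character map
lemma replace_go_single (c d : Char) : ∀ (l : List Char) (fuel : Nat) (acc : List Char),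
    l.length ≤ fuel →
    PySem.Chars.replace.go [c] [d] fuel l acc
      = acc.reverse ++ l.map (fun x => if x = c then d else x) := by
  intro l
  induction l with
  | nil =>
    intro fuel acc _
    cases fuel <;> simp [PySem.Chars.replace.go]
  | cons x t ih =>
    intro fuel acc h
    cases fuel with
    | zero => simp at h
    | succ n =>
      simp only [PySem.Chars.replace.go]
      by_cases hx : x = c
      · subst hx
        simp only [List.isPrefixOf, beq_self_eq_true, Bool.true_and, if_pos, List.length_cons, List.length_nil, Nat.zero_add, List.drop_succ_cons,
          List.drop_zero, List.reverse_cons, List.reverse_nil, List.nil_append]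
        rw [ih n ([d] ++ acc) (Nat.le_of_succ_le_succ h)]
        simp
      · rw [show ([c].isPrefixOf (x :: t)) = false by
          simp [List.isPrefixOf]; exact fun hc => absurd hc.symm hx]
        simp only [Bool.false_eq_true, if_false]
        rw [ih n (x :: acc) (Nat.le_of_succ_le_succ h)]
        simp [hx]

lemma replace_single (c d : Char) (l : List Char) :
    PySem.Chars.replace l [c] [d] = l.map (fun x => if x = c then d else x) := by
  rw [PySem.Chars.replace]
  simpa using replace_go_single c d l l.length [] (le_refl _)

lemma str_replace_single (c d : Char) (s : String) :
    (PySem.Str.replace s (String.ofList [c]) (String.ofList [d])).toList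
      = s.toList.map (fun x => if x = c then d else x) := by
  rw [PySem.Str.toList_replace]
  simp [replace_single, String.toList_ofList]

-- A's nine replace passes compute B's single character map
lemma foldl_str_replace (cs : List Char) (f : String) :
    (cs.foldl (fun s c => PySem.Str.replace s (String.ofList [c]) "_") f).toList
      = cs.foldl (fun l c => l.map (fun x => if x = c then '_' else x)) f.toList := by
  induction cs generalizing f with
  | nil => rfl
  | cons c cs ih =>
    simp only [List.foldl_cons]
    rw [ih]
    congr 1
    rw [show ("_" : String) = String.ofList ['_'] from rfl]
    exact str_replace_single c '_' f

lemma foldl_sub (cs : List Char) (h : '_' ∉ cs) (l : List Char) :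
    cs.foldl (fun l c => l.map (fun x => if x = c then '_' else x)) l
      = l.map (fun x => if x ∈ cs then '_' else x) := by
  induction cs generalizing l with
  | nil => simp
  | cons c cs ih =>
    simp only [List.foldl_cons]
    rw [ih (fun hm => h (List.mem_cons_of_mem _ hm)), List.map_map]
    apply List.map_congr_left
    intro x _
    by_cases hx : x = c
    · subst hx
      simp
    · simp [Function.comp, hx]

lemma head_eq (filename : String) :
    (("<>:\"/\\|?*".toList).foldl
        (fun s c => PySem.Str.replace s (String.ofList [c]) "_") filename).toList
      = filename.toList.map (fun c => if pvBad c then '_' else c) := by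
  rw [foldl_str_replace, foldl_sub _ (by decide) filename.toList]
  apply List.map_congr_left
  intro x _
  have hcs : "<>:\"/\\|?*".toList = ['<','>',':','"','/','\\','|','?','*'] := by decide
  rw [hcs]
  by_cases hx : x ∈ ['<','>',':','"','/','\\','|','?','*']
  · rw [if_pos hx]
    have : pvBad x = true := by simpa [pvBad] using hx
    simp [this]
  · rw [if_neg hx]
    have : pvBad x = false := by simpa [pvBad] using hx
    simp [this]

-- " .".contains is B's pvStripCh predicate
lemma strip_pred : (fun c => (" .".toList.contains c)) = pvStripCh := by
  funext c
  have h : " .".toList = [' ', '.'] := by decide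
  rw [h]
  by_cases h1 : c = ' '
  · simp [h1, pvStripCh]
  · by_cases h2 : c = '.'
    · simp [h2, pvStripCh]
    · simp only [List.contains_cons, List.contains_nil, Bool.or_false, pvStripCh]
      rw [show (c == ' ') = false by simpa using h1,
        show (c == '.') = false by simpa using h2,
        show (decide (c = ' ')) = false by simpa using h1,
        show (decide (c = '.')) = false by simpa using h2]

-- A's stripChars " ." is B's two-sided dropWhile
lemma strip_eq (s : String) :
    (PySem.Str.stripChars s " .").toList
      = ((s.toList.dropWhile pvStripCh).reverse.dropWhile pvStripCh).reverse := by
  rw [PySem.Str.toList_stripChars]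
  unfold PySem.Chars.stripChars
  rw [strip_pred]

-- the common tail: default-if-empty and truncation, on each side in its own form
lemma tail_eq (fn2 : String) (s : List Char) (h : fn2.toList = s) :
    (if PySem.Str.len (if fn2 = "" then "untitled" else fn2) > 200
       then PySem.Str.slice (if fn2 = "" then "untitled" else fn2) none (some 200)
       else (if fn2 = "" then "untitled" else fn2))
    = (if s = [] then "untitled" else String.ofList (s.take 200)) := by
  by_cases he : fn2 = ""
  · have hs : s = [] := by rw [← h, he]; rfl
    rw [if_pos he, if_pos hs,
      if_neg (show ¬ PySem.Str.len "untitled" > 200 from by decide)]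
  · have hs : s ≠ [] := by
      rintro rfl
      exact he (String.toList_inj.mp h)
    rw [if_neg he, if_neg hs]
    have hlen : PySem.Str.len fn2 = (s.length : Int) := by
      simp [PySem.Str.len, h]
    by_cases hl : 200 < s.length
    · rw [if_pos (by rw [hlen]; exact_mod_cast hl)]
      apply String.toList_inj.mp
      rw [PySem.Str.toList_slice, String.toList_ofList]
      simp only [PySem.Chars.slice_eq_listSlice]
      rw [show ((200 : Int) = ((200 : Nat) : Int)) from rfl, PySem.List.slice_to_natCast, h]
    · rw [if_neg (by rw [hlen]; exact_mod_cast hl)]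
      apply String.toList_inj.mp
      rw [String.toList_ofList, h, List.take_of_length_le (by omega)]

-- ===== VERDICT (by name: the statement is the Claim_ definition above) =====
theorem sanitize_filename_spec : Claim_equal_sanitize_filename := by
  intro filename _
  unfold Spec_sanitize_filename sanitize_filename sanitize_filename_alt
  exact tail_eq _ _ (by rw [strip_eq, head_eq])
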